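-- pv_equiv track=rewrite | github.com/M157q/ptt_statistics | ptt_statistics/utils.py | get_format_len_of_container
-- ===== SOURCE A (Python) =====
-- def get_format_len_of_str(s):
--     return len(str(s))
--
-- def get_format_len_of_num(n):
--     l = get_format_len_of_str(n)
--     l += (get_format_len_of_str(n)-1)//3
--     return l
--
-- def get_format_len_of_container(container, format_type):
--     if format_type == 'str':
--         format_lens = map(get_format_len_of_str, (e for e in container))
--     if format_type == 'num':
--         format_lens = map(get_format_len_of_num, (e for e in container))
--
--     try:
--         return max(format_lens)
--     except:
--         return 0
-- ===== SOURCE B (Python) =====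
-- def get_format_len_of_container(container, format_type):
--     try:
--         m = max(len(str(e)) for e in container)
--     except:
--         return 0
--     if format_type == 'str':
--         return m
--     if format_type == 'num':
--         return m + (m - 1) // 3
--     return 0
-- ===== Notes on version B (the rewrite author's own statement) =====
-- stated objective: alternative
-- what changed: B computes one overall maximum of the element string lengths and applies the thousands-separator formula l+(l-1)//3 once to that maximum (legitimate because the formula is monotone), instead of A's per-element mapping of the formula before the max; the empty/unknown-format cases fall out of a guard rather than a bare except.
import Mathlib
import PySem

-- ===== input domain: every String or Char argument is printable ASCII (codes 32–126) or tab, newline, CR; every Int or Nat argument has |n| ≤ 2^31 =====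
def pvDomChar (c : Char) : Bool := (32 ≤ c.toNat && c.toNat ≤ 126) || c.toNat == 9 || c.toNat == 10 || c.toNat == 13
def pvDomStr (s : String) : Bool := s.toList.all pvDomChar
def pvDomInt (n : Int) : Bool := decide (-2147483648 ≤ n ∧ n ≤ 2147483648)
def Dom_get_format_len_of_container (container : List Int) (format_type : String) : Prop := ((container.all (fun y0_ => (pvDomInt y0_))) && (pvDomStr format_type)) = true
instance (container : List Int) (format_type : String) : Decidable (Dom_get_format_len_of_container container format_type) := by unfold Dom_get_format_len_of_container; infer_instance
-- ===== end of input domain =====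

-- B computes the overall max string length once and applies the thousands-separator
-- formula as a single closed-form step after the max (valid since it is monotone),
-- instead of mapping it over every element; objective: alternative decomposition.


-- ===== PORT A =====
def get_format_len_of_str (n : Int) : Int := PySem.Str.len (PySem.Int.toStr n)

def get_format_len_of_num (n : Int) : Int :=
  let l := get_format_len_of_str n
  l + PySem.Int.floordiv (get_format_len_of_str n - 1) 3

def get_format_len_of_container (container : List Int) (format_type : String) : Int :=
  -- the two ifs of A: if neither fires, format_lens is unbound and max raises NameError,
  -- caught by the bare except → 0; modelled as Option (List Int)
  let format_lens : Option (List Int) :=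
    let fl0 : Option (List Int) := none
    let fl1 : Option (List Int) :=
      if format_type == "str" then some (container.map get_format_len_of_str) else fl0
    if format_type == "num" then some (container.map get_format_len_of_num) else fl1
  match format_lens with
  | none => 0
  | some ls =>
    match PySem.List.max? ls (fun y => y) with
    | none => 0          -- max([]) raises ValueError, caught → 0
    | some m => m

-- ===== PORT B =====
def get_format_len_of_container_alt (container : List Int) (format_type : String) : Int :=
  match PySem.List.max? (container.map (fun e => PySem.Str.len (PySem.Int.toStr e))) (fun y => y) with
  | none => 0
  | some m =>
    if format_type == "str" then m
    else if format_type == "num" then m + PySem.Int.floordiv (m - 1) 3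
    else 0

-- ===== PRECONDITION & SPEC =====
def Spec_get_format_len_of_container (container : List Int) (format_type : String) (out : Int) : Prop := out = get_format_len_of_container_alt container format_type
instance (container : List Int) (format_type : String) (out : Int) : Decidable (Spec_get_format_len_of_container container format_type out) := by unfold Spec_get_format_len_of_container; infer_instance

-- ===== CLAIM (what is proved, stated in full; the proofs are below) =====
def Claim_equal_get_format_len_of_container : Prop := ∀ (container : List Int) (format_type : String), Dom_get_format_len_of_container container format_type → Spec_get_format_len_of_container container format_type (get_format_len_of_container container format_type)

-- ===== LEMMAS AND PROOFS =====

-- the thousands-separator formula on a length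
def pvF (l : Int) : Int := l + PySem.Int.floordiv (l - 1) 3

theorem pv_num_eq_F (n : Int) : get_format_len_of_num n = pvF (get_format_len_of_str n) := rfl

-- pvF distributes over max (it is monotone)
theorem pv_f_max_hom (a b : Int) : pvF (max a b) = max (pvF a) (pvF b) := by
  unfold pvF
  rcases le_total a b with h | h
  · rw [max_eq_right h, max_eq_right]
    have := Int.ediv_le_ediv (by norm_num : (0:Int) < 3) (by omega : a - 1 ≤ b - 1)
    simp only [PySem.Int.floordiv_eq_ediv_of_pos (by norm_num : (0:Int) < 3)]
    omega
  · rw [max_eq_left h, max_eq_left]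
    have := Int.ediv_le_ediv (by norm_num : (0:Int) < 3) (by omega : b - 1 ≤ a - 1)
    simp only [PySem.Int.floordiv_eq_ediv_of_pos (by norm_num : (0:Int) < 3)]
    omega

-- folding running-max over the F-mapped lengths = F of the running max of lengths
theorem pv_foldl_max_map (t : List Int) (a : Int) :
    (t.map get_format_len_of_num).foldl max (pvF a)
      = pvF ((t.map get_format_len_of_str).foldl max a) := by
  induction t generalizing a with
  | nil => simp
  | cons h t ih =>
    simp only [List.map_cons, List.foldl_cons, pv_num_eq_F, ← pv_f_max_hom]
    exact ih _

-- ===== VERDICT (by name: the statement is the Claim_ definition above) =====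
theorem get_format_len_of_container_spec : Claim_equal_get_format_len_of_container := by
  intro container format_type _
  unfold Spec_get_format_len_of_container
  unfold get_format_len_of_container get_format_len_of_container_alt
  have hstr : (fun e => PySem.Str.len (PySem.Int.toStr e)) = get_format_len_of_str := rfl
  rw [hstr]
  by_cases hn : format_type == "num"
  · simp only [hn, if_true]
    cases container with
    | nil => rfl
    | cons x t =>
      simp only [List.map_cons, PySem.List.max?_id_cons]
      rw [pv_num_eq_F x, pv_foldl_max_map]
      have heq : format_type = "num" := by simpa using hn
      simp [heq, pvF]
  · simp only [hn]
    by_cases hs : format_type == "str"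
    · simp only [hs, if_true]
      cases container with
      | nil => simp
      | cons x t => simp [PySem.List.max?_id_cons]
    · simp only [hs]
      cases h : PySem.List.max? (container.map get_format_len_of_str) (fun y => y) <;> simp
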